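-- pv_equiv track=rewrite | github.com/isaacwasserman/otto_demo | ui_utils.py | add_background_and_corner_radius
-- ===== SOURCE A (Python) =====
-- def add_background_and_corner_radius(code: str) -> str:
--     # Line to add the background color and corner radius
--     customization_line = "fig.update_layout(paper_bgcolor='#244466', " "plot_bgcolor='#244466')\n"
--
--     # Find the location to insert the customization line
--     split_lines = code.split("\n")
--     for i, line in enumerate(split_lines):
--         if "st.plotly_chart(fig" in line:
--             split_lines.insert(i, customization_line)
--             break
--
--     # Reassemble the modified code
--     return "\n".join(split_lines)
-- ===== SOURCE B (Python) =====
-- def add_background_and_corner_radius(code: str) -> str: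
--     customization_line = "fig.update_layout(paper_bgcolor='#244466', " "plot_bgcolor='#244466')\n"
--     idx = code.find("st.plotly_chart(fig")
--     if idx == -1:
--         return code
--     line_start = code.rfind("\n", 0, idx) + 1
--     return code[:line_start] + customization_line + "\n" + code[line_start:]
-- ===== Notes on version B (the rewrite author's own statement) =====
-- stated objective: simpler
-- what changed: B drops the split-into-lines list and the scanning loop entirely: one find locates the marker, one rfind locates the start of its line, and the result is assembled from two string slices.
import Mathlib
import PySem

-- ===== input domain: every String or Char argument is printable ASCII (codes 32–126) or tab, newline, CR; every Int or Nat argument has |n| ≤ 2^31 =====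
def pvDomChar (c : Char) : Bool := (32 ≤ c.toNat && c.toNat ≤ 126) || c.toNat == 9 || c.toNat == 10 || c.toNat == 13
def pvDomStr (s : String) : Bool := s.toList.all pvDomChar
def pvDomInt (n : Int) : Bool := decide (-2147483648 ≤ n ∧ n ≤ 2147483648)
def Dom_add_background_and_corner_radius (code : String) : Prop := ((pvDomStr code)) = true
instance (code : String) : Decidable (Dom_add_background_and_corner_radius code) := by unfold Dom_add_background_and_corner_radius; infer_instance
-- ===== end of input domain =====

-- B replaces A's split-into-lines list and scanning loop by one find / one rfind and two slices of
-- the raw string (objective: simpler; same O(n) cost).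

-- the customization line and the marker (identical literals in A and B)
def abcrCust : List Char := "fig.update_layout(paper_bgcolor='#244466', plot_bgcolor='#244466')\n".toList
def abcrM : List Char := "st.plotly_chart(fig".toList

-- ===== PORT A =====
-- the 'for i, line in enumerate(split_lines): if marker in line: split_lines.insert(i, cust); break' loop
def abcrLoop : List (List Char) → List (List Char)
  | [] => []
  | line :: rest =>
    if PySem.Chars.isIn abcrM line then abcrCust :: line :: rest
    else line :: abcrLoop rest

def abcrA (cs : List Char) : List Char :=
  PySem.Chars.join ['\n'] (abcrLoop (PySem.Chars.splitOn cs ['\n']))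

def add_background_and_corner_radius (code : String) : String :=
  String.ofList (abcrA code.toList)

-- ===== PORT B =====
def abcrB (cs : List Char) : List Char :=
  let idx := PySem.Chars.find cs abcrM
  if idx = -1 then cs
  else
    let lineStart := PySem.Chars.rfindFrom cs ['\n'] 0 (some idx) + 1
    PySem.Chars.slice cs none (some lineStart) ++ abcrCust ++ ['\n'] ++
      PySem.Chars.slice cs (some lineStart) none

def add_background_and_corner_radius_alt (code : String) : String :=
  String.ofList (abcrB code.toList)

-- ===== PRECONDITION & SPEC =====
def Spec_add_background_and_corner_radius (code : String) (out : String) : Prop := out = add_background_and_corner_radius_alt code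
instance (code : String) (out : String) : Decidable (Spec_add_background_and_corner_radius code out) := by unfold Spec_add_background_and_corner_radius; infer_instance

-- ===== CLAIM (what is proved, stated in full; the proofs are below) =====
def Claim_equal_add_background_and_corner_radius : Prop := ∀ (code : String), Dom_add_background_and_corner_radius code → Spec_add_background_and_corner_radius code (add_background_and_corner_radius code)

-- ===== LEMMAS AND PROOFS =====

-- splitting on a single newline, as a structural recursion
def linesOf : List Char → List (List Char)
  | [] => [[]]
  | c :: r => if c = '\n' then [] :: linesOf r else (linesOf r).modifyHead (c :: ·)

theorem linesOf_ne_nil (cs : List Char) : linesOf cs ≠ [] := by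
  induction cs with
  | nil => simp [linesOf]
  | cons c r ih =>
    simp only [linesOf]
    split
    · simp
    · cases h : linesOf r with
      | nil => exact absurd h ih
      | cons x xs => simp

theorem splitOn_go_inv (fuel : ℕ) : ∀ (l cur : List Char) (acc : List (List Char)),
    l.length ≤ fuel →
    PySem.Chars.splitOn.go ['\n'] fuel l cur acc
      = acc.reverse ++ (linesOf l).modifyHead (cur.reverse ++ ·) := by
  induction fuel with
  | zero =>
    intro l cur acc h
    interval_cases hl : l.length
    have : l = [] := List.length_eq_zero_iff.mp hl
    subst this
    simp [PySem.Chars.splitOn.go, linesOf]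
  | succ fuel ih =>
    intro l cur acc h
    cases l with
    | nil => simp [PySem.Chars.splitOn.go, linesOf]
    | cons c rest =>
      simp only [PySem.Chars.splitOn.go]
      by_cases hc : c = '\n'
      · subst hc
        rw [if_pos (by simp [List.isPrefixOf])]
        rw [ih _ _ _ (by simpa using Nat.le_of_succ_le_succ (by simpa using h))]
        simp [linesOf]
        cases hlr : linesOf rest with
        | nil => exact absurd hlr (linesOf_ne_nil rest)
        | cons x xs => simp
      · rw [if_neg (by simp [List.isPrefixOf]; exact fun hh => absurd hh.symm hc)]
        rw [ih _ _ _ (by simpa using Nat.le_of_succ_le_succ (by simpa using h))]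
        simp only [linesOf, if_neg hc]
        cases hlr : linesOf rest with
        | nil => exact absurd hlr (linesOf_ne_nil rest)
        | cons x xs => simp

theorem splitOn_eq_linesOf (cs : List Char) :
    PySem.Chars.splitOn cs ['\n'] = linesOf cs := by
  show PySem.Chars.splitOn.go ['\n'] (cs.length + 1) cs [] [] = linesOf cs
  rw [splitOn_go_inv _ _ _ _ (by omega)]
  cases h : linesOf cs with
  | nil => exact absurd h (linesOf_ne_nil cs)
  | cons x xs => simp

theorem join_linesOf (cs : List Char) : PySem.Chars.join ['\n'] (linesOf cs) = cs := by
  induction cs with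
  | nil => simp [linesOf, PySem.Chars.join_singleton]
  | cons c r ih =>
    simp only [linesOf]
    by_cases hc : c = '\n'
    · subst hc
      rw [if_pos rfl]
      cases h : linesOf r with
      | nil => exact absurd h (linesOf_ne_nil r)
      | cons x xs =>
        rw [PySem.Chars.join_cons_cons]
        rw [h] at ih
        simp [ih]
    · rw [if_neg hc]
      cases h : linesOf r with
      | nil => exact absurd h (linesOf_ne_nil r)
      | cons x xs =>
        rw [h] at ih
        cases xs with
        | nil =>
          simp only [List.modifyHead]
          rw [PySem.Chars.join_singleton] at ih ⊢
          simp [ih]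
        | cons y ys =>
          simp only [List.modifyHead]
          rw [PySem.Chars.join_cons_cons] at ih ⊢
          simp [← ih]

theorem linesOf_no_nl (cs : List Char) (h : '\n' ∉ cs) : linesOf cs = [cs] := by
  induction cs with
  | nil => simp [linesOf]
  | cons c r ih =>
    simp only [linesOf]
    rw [if_neg (by intro hc; exact h (hc ▸ List.mem_cons_self))]
    rw [ih (fun hm => h (List.mem_cons_of_mem _ hm))]
    simp [List.modifyHead]

theorem linesOf_append (l r : List Char) (h : '\n' ∉ l) :
    linesOf (l ++ '\n' :: r) = l :: linesOf r := by
  induction l with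
  | nil => simp [linesOf]
  | cons c t ih =>
    simp only [List.cons_append, linesOf]
    rw [if_neg (by intro hc; exact h (hc ▸ List.mem_cons_self))]
    rw [ih (fun hm => h (List.mem_cons_of_mem _ hm))]
    simp [List.modifyHead]

-- find = j if there is an occurrence at j and none earlier
theorem find_eq_of (cs m : List Char) (j : ℕ) (hj : m <+: cs.drop j)
    (hmin : ∀ i < j, ¬ m <+: cs.drop i) : PySem.Chars.find cs m = j := by
  have hinf : m <:+: cs := hj.isInfix.trans (List.drop_suffix j cs).isInfix
  have hnn : 0 ≤ PySem.Chars.find cs m := (PySem.Chars.find_nonneg_iff cs m).mpr hinf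
  obtain ⟨hpre, hlt⟩ := PySem.Chars.find_spec hnn
  have h1 : ¬ (PySem.Chars.find cs m).toNat < j := fun hlt' => hmin _ hlt' hpre
  have h2 : ¬ j < (PySem.Chars.find cs m).toNat := fun hlt' => hlt _ hlt' hj
  omega

-- an occurrence inside l of a newline-free pattern stays inside l
theorem prefix_drop_left (l r m : List Char) (i : ℕ) (hi : i ≤ l.length)
    (hm : '\n' ∉ m) (h : m <+: (l ++ '\n' :: r).drop i) : m <+: l.drop i := by
  rw [List.drop_append_of_le_length hi] at h
  by_cases hlen : m.length ≤ l.length - i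
  · rw [List.prefix_iff_eq_take] at h ⊢
    rwa [List.take_append_of_le_length (by simp; omega)] at h
  · exfalso
    apply hm
    have heq := List.prefix_iff_eq_take.mp h
    have hidx : (l.drop i ++ '\n' :: r)[l.length - i]'(by simp) = '\n' := by
      rw [List.getElem_append_right (by simp)]
      simp
    have hlt : l.length - i < (List.take m.length (List.drop i l ++ '\n' :: r)).length := by
      simp; omega
    have hmem : '\n' ∈ List.take m.length (List.drop i l ++ '\n' :: r) := by
      have h2 := List.getElem_mem hlt
      rwa [List.getElem_take, hidx] at h2
    exact heq ▸ hmem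

theorem prefix_drop_left' (l r m : List Char) (i : ℕ) (hi : i ≤ l.length)
    (h : m <+: l.drop i) : m <+: (l ++ '\n' :: r).drop i := by
  rw [List.drop_append_of_le_length hi]
  exact h.trans (List.prefix_append _ _)

theorem prefix_drop_shift (l r m : List Char) (i : ℕ) :
    m <+: (l ++ '\n' :: r).drop (l.length + 1 + i) ↔ m <+: r.drop i := by
  rw [List.drop_append (l₁ := l)]
  have : l.length + 1 + i - l.length = 1 + i := by omega
  simp [this, List.drop_eq_nil_of_le (by omega : l.length ≤ l.length + 1 + i)]
  rw [show 1 + i = i + 1 by omega]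
  simp

theorem isIn_eq_false_iff_find (m l : List Char) :
    PySem.Chars.isIn m l = false ↔ PySem.Chars.find l m = -1 := by
  rw [PySem.Chars.isIn.eq_1]
  simp

-- marker found in l: search in l ++ '\n' :: r finds it at the same place, inside l
theorem find_append_left (l r m : List Char) (hm : '\n' ∉ m) (hme : m ≠ [])
    (hin : PySem.Chars.isIn m l = true) :
    PySem.Chars.find (l ++ '\n' :: r) m = PySem.Chars.find l m ∧
      (PySem.Chars.find l m).toNat ≤ l.length := by
  have hnn : 0 ≤ PySem.Chars.find l m :=
    (PySem.Chars.find_nonneg_iff l m).mpr ((PySem.Chars.isIn_iff_infix m l).mp hin)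
  obtain ⟨hpre, hmin⟩ := PySem.Chars.find_spec hnn
  set j := (PySem.Chars.find l m).toNat with hj
  have hjle : j ≤ l.length := by
    by_contra hgt
    rw [List.drop_eq_nil_of_le (by omega)] at hpre
    exact hme (List.prefix_nil.mp hpre)
  refine ⟨?_, hjle⟩
  rw [find_eq_of (l ++ '\n' :: r) m j (prefix_drop_left' l r m j hjle hpre)
    (fun i hilt hpre' => hmin i hilt
      (prefix_drop_left l r m i (by omega) hm hpre'))]
  omega

-- marker not in l but in r: find skips l and the newline
theorem find_append_right (l r m : List Char) (hm : '\n' ∉ m)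
    (hnotin : PySem.Chars.isIn m l = false) (hinr : PySem.Chars.isIn m r = true) :
    PySem.Chars.find (l ++ '\n' :: r) m = l.length + 1 + PySem.Chars.find r m := by
  have hnn : 0 ≤ PySem.Chars.find r m :=
    (PySem.Chars.find_nonneg_iff r m).mpr ((PySem.Chars.isIn_iff_infix m r).mp hinr)
  obtain ⟨hpre, hmin⟩ := PySem.Chars.find_spec hnn
  set j := (PySem.Chars.find r m).toNat with hj
  have := find_eq_of (l ++ '\n' :: r) m (l.length + 1 + j)
    ((prefix_drop_shift l r m j).mpr hpre)
    (fun i hilt hpre' => by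
      by_cases hil : i ≤ l.length
      · have := prefix_drop_left l r m i hil hm hpre'
        have : PySem.Chars.isIn m l = true := by
          rw [← PySem.Chars.exists_prefix_drop_iff_isIn]
          exact ⟨i, this⟩
        simp [this] at hnotin
      · have hdec : i = l.length + 1 + (i - l.length - 1) := by omega
        rw [hdec, prefix_drop_shift] at hpre'
        exact hmin _ (by omega) hpre')
  rw [this]
  push_cast
  omega

-- no occurrence in either part means none at all
theorem isIn_append_false (l r m : List Char) (hm : '\n' ∉ m)
    (h1 : PySem.Chars.isIn m l = false) (h2 : PySem.Chars.isIn m r = false) :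
    PySem.Chars.isIn m (l ++ '\n' :: r) = false := by
  rw [← Bool.not_eq_true, ← PySem.Chars.exists_prefix_drop_iff_isIn]
  rintro ⟨i, hi⟩
  by_cases hil : i ≤ l.length
  · have := prefix_drop_left l r m i hil hm hi
    have : PySem.Chars.isIn m l = true :=
      (PySem.Chars.exists_prefix_drop_iff_isIn m l).mp ⟨i, this⟩
    simp [this] at h1
  · have hdec : i = l.length + 1 + (i - l.length - 1) := by omega
    rw [hdec, prefix_drop_shift] at hi
    have : PySem.Chars.isIn m r = true :=
      (PySem.Chars.exists_prefix_drop_iff_isIn m r).mp ⟨_, hi⟩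
    simp [this] at h2

-- rfind.go returns the largest occurrence ≤ j, or -1
theorem rfind_go_spec (s sub : List Char) : ∀ j : ℕ,
    (PySem.Chars.rfind.go s sub j = -1 ∧ ∀ i ≤ j, ¬ sub <+: s.drop i) ∨
    (∃ k ≤ j, PySem.Chars.rfind.go s sub j = (k : ℤ) ∧ sub <+: s.drop k ∧
      ∀ i, k < i → i ≤ j → ¬ sub <+: s.drop i) := by
  intro j
  induction j with
  | zero =>
    by_cases h : sub.isPrefixOf s
    · right
      exact ⟨0, le_refl 0, by simp [PySem.Chars.rfind.go, h],
        by simpa using List.isPrefixOf_iff_prefix.mp h, fun i h1 h2 => by omega⟩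
    · left
      refine ⟨by simp [PySem.Chars.rfind.go, h], fun i hi => ?_⟩
      interval_cases i
      simpa using fun hp => h (List.isPrefixOf_iff_prefix.mpr hp)
  | succ j ih =>
    by_cases h : sub.isPrefixOf (s.drop (j + 1))
    · right
      exact ⟨j + 1, le_refl _, by simp [PySem.Chars.rfind.go, h],
        List.isPrefixOf_iff_prefix.mp h, fun i h1 h2 => by omega⟩
    · have hgo : PySem.Chars.rfind.go s sub (j + 1) = PySem.Chars.rfind.go s sub j := by
        simp [PySem.Chars.rfind.go, h]
      have hnp : ¬ sub <+: s.drop (j + 1) := fun hp => h (List.isPrefixOf_iff_prefix.mpr hp)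
      rcases ih with ⟨he, hall⟩ | ⟨k, hk, he, hp, hmax⟩
      · left
        refine ⟨hgo ▸ he, fun i hi => ?_⟩
        by_cases hij : i ≤ j
        · exact hall i hij
        · have : i = j + 1 := by omega
          exact this ▸ hnp
      · right
        refine ⟨k, by omega, hgo ▸ he, hp, fun i h1 h2 => ?_⟩
        by_cases hij : i ≤ j
        · exact hmax i h1 hij
        · have : i = j + 1 := by omega
          exact this ▸ hnp

theorem rfind_eq_neg (s sub : List Char) (h : ∀ i ≤ s.length, ¬ sub <+: s.drop i) :
    PySem.Chars.rfind s sub = -1 := by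
  rcases rfind_go_spec s sub s.length with ⟨he, _⟩ | ⟨k, hk, he, hp, _⟩
  · exact he
  · exact absurd hp (h k hk)

theorem rfind_eq_of (s sub : List Char) (k : ℕ) (hk : k ≤ s.length)
    (hp : sub <+: s.drop k) (hmax : ∀ i, k < i → i ≤ s.length → ¬ sub <+: s.drop i) :
    PySem.Chars.rfind s sub = (k : ℤ) := by
  rcases rfind_go_spec s sub s.length with ⟨_, hall⟩ | ⟨k', hk', he, hp', hmax'⟩
  · exact absurd hp (hall k hk)
  · have h1 : ¬ k < k' := fun h => hmax k' h hk' hp'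
    have h2 : ¬ k' < k := fun h => hmax' k h hk hp
    have : k' = k := by omega
    exact this ▸ he

theorem rfind_cases (s sub : List Char) :
    PySem.Chars.rfind s sub = -1 ∨ ∃ k : ℕ, PySem.Chars.rfind s sub = (k : ℤ) := by
  rcases rfind_go_spec s sub s.length with ⟨he, _⟩ | ⟨k, _, he, _, _⟩
  · exact Or.inl he
  · exact Or.inr ⟨k, he⟩

theorem nl_prefix_mem (t : List Char) (i : ℕ) (h : ['\n'] <+: t.drop i) : '\n' ∈ t := by
  have : '\n' ∈ t.drop i := h.mem (by simp)
  exact List.mem_of_mem_drop this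

theorem rfind_no_nl (t : List Char) (h : '\n' ∉ t) :
    PySem.Chars.rfind t ['\n'] = -1 :=
  rfind_eq_neg t _ (fun i _ hp => h (nl_prefix_mem t i hp))

theorem rfind_append_plus (l t : List Char) :
    (PySem.Chars.rfind (l ++ '\n' :: t) ['\n'] + 1).toNat
      = l.length + 1 + (PySem.Chars.rfind t ['\n'] + 1).toNat := by
  have hshift : ∀ (i : ℕ), ['\n'] <+: (l ++ '\n' :: t).drop (l.length + 1 + i) ↔ ['\n'] <+: t.drop i := by
    intro i
    rw [List.drop_append (l₁ := l)]
    rw [List.drop_eq_nil_of_le (by omega : l.length ≤ l.length + 1 + i)]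
    have : l.length + 1 + i - l.length = i + 1 := by omega
    simp [this]
  rcases rfind_go_spec t ['\n'] t.length with ⟨he, hall⟩ | ⟨k, hk, he, hp, hmax⟩
  · have h1 : PySem.Chars.rfind t ['\n'] = -1 := he
    rw [h1]
    have h2 : PySem.Chars.rfind (l ++ '\n' :: t) ['\n'] = (l.length : ℤ) := by
      apply rfind_eq_of _ _ l.length (by simp)
      · rw [List.drop_append_of_le_length (le_refl _)]
        simp
      · intro i hgt hle hpre
        have hdec : i = l.length + 1 + (i - l.length - 1) := by omega
        rw [hdec, hshift] at hpre
        exact hall _ (by simp at hle; omega) hpre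
    rw [h2]
    omega
  · have hrt : PySem.Chars.rfind t ['\n'] = (k : ℤ) := he
    rw [hrt]
    have h2 : PySem.Chars.rfind (l ++ '\n' :: t) ['\n'] = ((l.length + 1 + k : ℕ) : ℤ) := by
      apply rfind_eq_of _ _ (l.length + 1 + k) (by simp; omega)
      · exact (hshift k).mpr hp
      · intro i hgt hle hpre
        have hdec : i = l.length + 1 + (i - l.length - 1) := by omega
        rw [hdec, hshift] at hpre
        exact hmax _ (by omega) (by simp at hle; omega) hpre
    rw [h2]
    omega

theorem rfindFrom_take (cs sub : List Char) (k : ℕ) (hk : k ≤ cs.length) :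
    PySem.Chars.rfindFrom cs sub (0 : ℤ) (some (k : ℤ))
      = PySem.Chars.rfind (cs.take k) sub := by
  simp only [PySem.Chars.rfindFrom]
  split_ifs <;> try (exfalso; omega)
  all_goals simp_all

theorem abcrLoop_ne_nil (ls : List (List Char)) (h : ls ≠ []) : abcrLoop ls ≠ [] := by
  cases ls with
  | nil => exact absurd rfl h
  | cons x xs =>
    simp only [abcrLoop]
    split <;> simp

theorem exists_decomp (cs : List Char) (h : '\n' ∈ cs) :
    ∃ l r, cs = l ++ '\n' :: r ∧ '\n' ∉ l := by
  induction cs with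
  | nil => simp at h
  | cons c t ih =>
    by_cases hc : c = '\n'
    · exact ⟨[], t, by simp [hc], by simp⟩
    · have : '\n' ∈ t := by
        rcases List.mem_cons.mp h with h1 | h1
        · exact absurd h1.symm hc
        · exact h1
      obtain ⟨l, r, heq, hnl⟩ := ih this
      exact ⟨c :: l, r, by simp [heq], by simp [hnl]; exact fun hh => hc hh.symm⟩

theorem abcrM_props : abcrM ≠ [] ∧ '\n' ∉ abcrM := by decide

theorem abcr_core_eq : ∀ (n : ℕ) (cs : List Char), cs.length = n → abcrA cs = abcrB cs := by
  intro n
  induction n using Nat.strong_induction_on with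
  | _ n ih =>
    intro cs hlen
    obtain ⟨hm_ne, hm_nl⟩ := abcrM_props
    unfold abcrA abcrB
    rw [splitOn_eq_linesOf]
    by_cases hnl : '\n' ∈ cs
    · obtain ⟨l, r, rfl, hlnl⟩ := exists_decomp cs hnl
      have hlen' : r.length < n := by simp at hlen; omega
      have IHr := ih r.length (by omega) r rfl
      unfold abcrA abcrB at IHr
      rw [splitOn_eq_linesOf] at IHr
      rw [linesOf_append l r hlnl]
      cases hil : PySem.Chars.isIn abcrM l with
      | true =>
        -- the marker line is l: insert at the front
        simp only [abcrLoop, hil, if_pos]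
        obtain ⟨hfeq, hjle⟩ := find_append_left l r abcrM hm_nl hm_ne hil
        have hnn : 0 ≤ PySem.Chars.find l abcrM :=
          (PySem.Chars.find_nonneg_iff l abcrM).mpr ((PySem.Chars.isIn_iff_infix _ _).mp hil)
        rw [hfeq]
        rw [if_neg (by omega)]
        have hidx : PySem.Chars.find l abcrM = (((PySem.Chars.find l abcrM).toNat : ℕ) : ℤ) := by omega
        rw [hidx, rfindFrom_take _ _ _ (by simp; omega)]
        rw [List.take_append_of_le_length hjle]
        rw [rfind_no_nl _ (fun hm => hlnl ((List.take_sublist _ _).subset hm))]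
        simp only [PySem.Chars.slice_eq_listSlice]
        norm_num
        cases hlr : linesOf r with
        | nil => exact absurd hlr (linesOf_ne_nil r)
        | cons x xs =>
          rw [PySem.Chars.join_cons_cons]
          rw [← hlr, ← linesOf_append l r hlnl, join_linesOf]
          simp
          rw [PySem.List.slice_to _ (by omega)]
          simp
      | false =>
        simp only [abcrLoop, hil, Bool.false_eq_true, if_false]
        cases hir : PySem.Chars.isIn abcrM r with
        | false =>
          -- marker nowhere: both sides return the input
          have hnone := isIn_append_false l r abcrM hm_nl hil hir
          rw [if_pos ((isIn_eq_false_iff_find _ _).mp hnone)]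
          rw [if_pos ((isIn_eq_false_iff_find _ _).mp hir)] at IHr
          cases heq : abcrLoop (linesOf r) with
          | nil => exact absurd heq (abcrLoop_ne_nil _ (linesOf_ne_nil r))
          | cons x xs =>
            rw [PySem.Chars.join_cons_cons, ← heq, IHr]
            simp
        | true =>
          -- marker first occurs inside r: everything shifts by l.length + 1
          have hfeq := find_append_right l r abcrM hm_nl hil hir
          have hnn : 0 ≤ PySem.Chars.find r abcrM :=
            (PySem.Chars.find_nonneg_iff r abcrM).mpr ((PySem.Chars.isIn_iff_infix _ _).mp hir)
          have hle' : PySem.Chars.find r abcrM ≤ (r.length : ℤ) := PySem.Chars.find_le_length r abcrM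
          set j' := (PySem.Chars.find r abcrM).toNat with hj'
          have hjr : PySem.Chars.find r abcrM = (j' : ℤ) := by omega
          have hj'le : j' ≤ r.length := by omega
          rw [if_neg (by omega)] at IHr
          rw [hjr, rfindFrom_take _ _ _ hj'le] at IHr
          rw [if_neg (by rw [hfeq]; omega)]
          rw [hfeq, hjr]
          rw [show (l.length : ℤ) + 1 + (j' : ℤ) = ((l.length + 1 + j' : ℕ) : ℤ) by push_cast; omega]
          rw [rfindFrom_take _ _ _ (by simp; omega)]
          rw [List.take_append (l₁ := l)]
          rw [List.take_of_length_le (by omega), show l.length + 1 + j' - l.length = j' + 1 by omega]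
          rw [List.take_succ_cons]
          have hplus := rfind_append_plus l (r.take j')
          -- names for the two line starts
          set S : ℤ := PySem.Chars.rfind (r.take j') ['\n'] + 1 with hS
          set L : ℤ := PySem.Chars.rfind (l ++ '\n' :: r.take j') ['\n'] + 1 with hL
          have hSnn : 0 ≤ S := by
            rcases rfind_cases (r.take j') ['\n'] with h1 | ⟨k, h1⟩ <;> rw [hS, h1] <;> omega
          have hLtoNat : L.toNat = l.length + 1 + S.toNat := hplus
          have hLnn : 0 ≤ L := by omega
          simp only [PySem.Chars.slice_eq_listSlice] at IHr ⊢
          rw [PySem.List.slice_to _ hSnn, PySem.List.slice_from _ hSnn] at IHr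
          rw [PySem.List.slice_to _ hLnn, PySem.List.slice_from _ hLnn]
          rw [hLtoNat]
          rw [List.take_append (l₁ := l), List.take_of_length_le (by omega),
            show l.length + 1 + S.toNat - l.length = S.toNat + 1 by omega, List.take_succ_cons]
          rw [List.drop_append (l₁ := l), List.drop_eq_nil_of_le (by omega),
            show l.length + 1 + S.toNat - l.length = S.toNat + 1 by omega, List.drop_succ_cons]
          cases heq : abcrLoop (linesOf r) with
          | nil => exact absurd heq (abcrLoop_ne_nil _ (linesOf_ne_nil r))
          | cons x xs =>
            rw [PySem.Chars.join_cons_cons, ← heq, IHr]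
            simp
    · -- no newline: a single line both ways
      rw [linesOf_no_nl cs hnl]
      cases hin : PySem.Chars.isIn abcrM cs with
      | false =>
        simp only [abcrLoop, hin, Bool.false_eq_true, if_false]
        rw [if_pos ((isIn_eq_false_iff_find _ _).mp hin)]
        simp [PySem.Chars.join_singleton]
      | true =>
        simp only [abcrLoop, hin, if_pos]
        have hnn : 0 ≤ PySem.Chars.find cs abcrM :=
          (PySem.Chars.find_nonneg_iff cs abcrM).mpr ((PySem.Chars.isIn_iff_infix _ _).mp hin)
        rw [if_neg (by omega)]
        have hidx : PySem.Chars.find cs abcrM = (((PySem.Chars.find cs abcrM).toNat : ℕ) : ℤ) := by omega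
        have hle' : PySem.Chars.find cs abcrM ≤ (cs.length : ℤ) := PySem.Chars.find_le_length cs abcrM
        rw [hidx, rfindFrom_take _ _ _ (by omega)]
        rw [rfind_no_nl _ (fun hm => hnl ((List.take_sublist _ _).subset hm))]
        simp only [PySem.Chars.slice_eq_listSlice]
        norm_num
        rw [PySem.Chars.join_cons_cons, PySem.Chars.join_singleton]
        simp
        rw [PySem.List.slice_to _ (by omega)]
        simp

-- ===== VERDICT (by name: the statement is the Claim_ definition above) =====
theorem add_background_and_corner_radius_spec : Claim_equal_add_background_and_corner_radius := by
  intro code _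
  unfold Spec_add_background_and_corner_radius add_background_and_corner_radius add_background_and_corner_radius_alt
  rw [abcr_core_eq code.toList.length code.toList rfl]
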